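-- pv_equiv track=rewrite | github.com/Kawron/Algorithms-and-Data-Structures | Dynamic/2d_knapsack.py | knapsack_2d
-- ===== SOURCE A (Python) =====
-- def knapsack_2d(A,B,C,max_w,max_h):
--     n = len(A)
--     F = [[[0 for _ in range(max_w+1)] for _ in range(max_h+1)] for _ in range(n)]
--     # warunki początkowe
--     for w in range(max_w+1):
--         for h in range(max_h+1):
--             if B[0] <= w and C[0] <= h:
--                 F[0][h][w] = A[0]
--     # main loop
--     for i in range(1, n):
--         for w in range(max_w+1):
--             for h in range(max_h+1):
--                 F[i][h][w] = F[i-1][h][w]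
--                 if w >= B[i] and h >= C[i]:
--                     F[i][h][w] = max(F[i][h][w], F[i-1][h-C[i]][w-B[i]]+A[i])
--     return F[n-1][max_h][max_w]
-- ===== SOURCE B (Python) =====
-- def knapsack_2d(A, B, C, max_w, max_h):
--     # top-down memoized recursion over (item, remaining width, remaining height):
--     # only reachable capacity states are ever computed, stored sparsely in a dict
--     memo = {}
--
--     def best(i, w, h):
--         key = (i, w, h)
--         if key in memo:
--             return memo[key]
--         if i == 0:
--             r = A[0] if B[0] <= w and C[0] <= h else 0
--         else:
--             r = best(i - 1, w, h)
--             if w >= B[i] and h >= C[i]: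
--                 r = max(r, best(i - 1, w - B[i], h - C[i]) + A[i])
--         memo[key] = r
--         return r
--
--     return best(len(A) - 1, max_w, max_h)
-- ===== Notes on version B (the rewrite author's own statement) =====
-- stated objective: alternative
-- what changed: Replaces A's bottom-up tabulation over a dense 3D array of all n*(max_h+1)*(max_w+1) states with top-down memoized recursion that computes only the capacity states actually reachable from (max_w, max_h), stored sparsely in a dict keyed by (item, width, height); Pre_ excludes exactly the inputs where A raises (empty A, negative capacities, missing weights/heights, or a negative item dimension that sends a read out of range).
import Mathlib
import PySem

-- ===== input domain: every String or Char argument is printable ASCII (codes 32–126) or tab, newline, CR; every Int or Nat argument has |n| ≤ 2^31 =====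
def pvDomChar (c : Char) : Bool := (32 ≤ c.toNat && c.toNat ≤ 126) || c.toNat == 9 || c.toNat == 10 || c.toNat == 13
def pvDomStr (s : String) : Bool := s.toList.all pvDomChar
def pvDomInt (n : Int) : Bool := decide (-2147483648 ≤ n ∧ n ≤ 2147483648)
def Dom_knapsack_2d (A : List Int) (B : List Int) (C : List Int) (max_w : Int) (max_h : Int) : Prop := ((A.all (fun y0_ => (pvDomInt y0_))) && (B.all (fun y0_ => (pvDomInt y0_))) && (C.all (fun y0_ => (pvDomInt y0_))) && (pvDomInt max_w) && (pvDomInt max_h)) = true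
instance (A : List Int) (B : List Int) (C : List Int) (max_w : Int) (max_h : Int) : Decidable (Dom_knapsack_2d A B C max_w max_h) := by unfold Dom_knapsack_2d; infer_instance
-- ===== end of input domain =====

-- B replaces A's bottom-up dense 3D table with top-down memoized recursion over the reachable
-- capacity states, stored sparsely in a dict; equal return values wherever A returns (Pre_).

-- A-side subscript helpers: t[h][w] / t[i][h][w] on array-backed tables (Python lists are
-- O(1)-indexed arrays); under Pre_ every index used is nonnegative and in range, so the
-- `.toNat`/default reads and the bounds-checked writes are exact there
def idx2 (T : Array (Array Int)) (h w : Int) : Int := (T.getD h.toNat #[]).getD w.toNat 0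
def set2 (T : Array (Array Int)) (h w v : Int) : Array (Array Int) :=
  T.modify h.toNat (fun row => row.setIfInBounds w.toNat v)
def idx3 (F : Array (Array (Array Int))) (i h w : Int) : Int := idx2 (F.getD i.toNat #[]) h w
def set3 (F : Array (Array (Array Int))) (i h w v : Int) : Array (Array (Array Int)) :=
  F.modify i.toNat (fun T => set2 T h w v)

-- ===== PORT A =====
def knapsack_2d (A : List Int) (B : List Int) (C : List Int) (max_w : Int) (max_h : Int) : Int :=
  let n : Int := A.length
  let F0 : Array (Array (Array Int)) :=
    Array.replicate A.length (Array.replicate (max_h + 1).toNat (Array.replicate (max_w + 1).toNat 0))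
  -- warunki początkowe
  let F1 := (PySem.List.pyRange 0 (max_w + 1) 1).foldl (fun F w =>
    (PySem.List.pyRange 0 (max_h + 1) 1).foldl (fun F h =>
      if B.getD 0 0 ≤ w ∧ C.getD 0 0 ≤ h then set3 F 0 h w (A.getD 0 0) else F) F) F0
  -- main loop
  let F2 := (PySem.List.pyRange 1 n 1).foldl (fun F i =>
    (PySem.List.pyRange 0 (max_w + 1) 1).foldl (fun F w =>
      (PySem.List.pyRange 0 (max_h + 1) 1).foldl (fun F h =>
        let F' := set3 F i h w (idx3 F (i - 1) h w)
        if w ≥ B.getD i.toNat 0 ∧ h ≥ C.getD i.toNat 0 then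
          set3 F' i h w (max (idx3 F' i h w)
            (idx3 F' (i - 1) (h - C.getD i.toNat 0) (w - B.getD i.toNat 0) + A.getD i.toNat 0))
        else F') F) F) F1
  idx3 F2 (n - 1) max_h max_w

-- ===== PORT B =====
-- Source B's inner `best(i, w, h)` with the memo dict threaded through (Python closes over it);
-- recursion is on the item index, exactly as in Source B (i = 0 base case, i → i - 1 step)
def bestB (A B C : List Int) : Nat → Int → Int → PySem.Dict (Nat × Int × Int) Int →
    Int × PySem.Dict (Nat × Int × Int) Int
  | 0, w, h, memo =>
    match memo.get? (0, w, h) with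
    | some v => (v, memo)
    | none =>
      let r := if B.getD 0 0 ≤ w ∧ C.getD 0 0 ≤ h then A.getD 0 0 else 0
      (r, memo.insert (0, w, h) r)
  | i + 1, w, h, memo =>
    match memo.get? (i + 1, w, h) with
    | some v => (v, memo)
    | none =>
      let p := bestB A B C i w h memo
      if w ≥ B.getD (i + 1) 0 ∧ h ≥ C.getD (i + 1) 0 then
        let q := bestB A B C i (w - B.getD (i + 1) 0) (h - C.getD (i + 1) 0) p.2
        let r := max p.1 (q.1 + A.getD (i + 1) 0)
        (r, q.2.insert (i + 1, w, h) r)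
      else
        (p.1, p.2.insert (i + 1, w, h) p.1)

def knapsack_2d_alt (A : List Int) (B : List Int) (C : List Int) (max_w : Int) (max_h : Int) : Int :=
  (bestB A B C (A.length - 1) max_w max_h PySem.Dict.empty).1

-- ===== PRECONDITION & SPEC =====
-- Pre_ = exactly the inputs on which A returns: nonempty items, capacities ≥ 0, a weight for
-- every item, a height for every item whose weight fits (short-circuit), and no negative item
-- dimension whose guarded read would go out of range.
def Pre_knapsack_2d (A : List Int) (B : List Int) (C : List Int) (max_w : Int) (max_h : Int) : Prop :=
  1 ≤ A.length ∧ A.length ≤ B.length ∧ 0 ≤ max_w ∧ 0 ≤ max_h ∧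
  (∀ i < A.length, B.getD i 0 ≤ max_w → i < C.length) ∧
  (∀ i < A.length, 1 ≤ i →
    (B.getD i 0 ≤ max_w → 0 ≤ C.getD i 0) ∧ (B.getD i 0 < 0 → max_h < C.getD i 0))
instance (A : List Int) (B : List Int) (C : List Int) (max_w : Int) (max_h : Int) : Decidable (Pre_knapsack_2d A B C max_w max_h) := by unfold Pre_knapsack_2d; infer_instance

def pvWitness_knapsack_2d : List Int × List Int × List Int × Int × Int := ([3, 4], [1, 2], [1, 1], 2, 2)

def Spec_knapsack_2d (A : List Int) (B : List Int) (C : List Int) (max_w : Int) (max_h : Int) (out : Int) : Prop := out = knapsack_2d_alt A B C max_w max_h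
instance (A : List Int) (B : List Int) (C : List Int) (max_w : Int) (max_h : Int) (out : Int) : Decidable (Spec_knapsack_2d A B C max_w max_h out) := by unfold Spec_knapsack_2d; infer_instance

-- ===== CLAIM (what is proved, stated in full; the proofs are below) =====
def Claim_equal_knapsack_2d : Prop := ∀ (A : List Int) (B : List Int) (C : List Int) (max_w : Int) (max_h : Int), Dom_knapsack_2d A B C max_w max_h → Pre_knapsack_2d A B C max_w max_h → Spec_knapsack_2d A B C max_w max_h (knapsack_2d A B C max_w max_h)

-- ===== LEMMAS AND PROOFS =====

-- dimension predicate for one 2D layer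
def dimsT (mh mw : Int) (T : Array (Array Int)) : Prop :=
  T.size = (mh + 1).toNat ∧ ∀ j < T.size, (T.getD j #[]).size = (mw + 1).toNat

-- mathematical DP value after items 0..k (the shared recurrence of both programs)
def gDP (A B C : List Int) : Nat → Int → Int → Int
  | 0 => fun h w => if B.getD 0 0 ≤ w ∧ C.getD 0 0 ≤ h then A.getD 0 0 else 0
  | (k+1) => fun h w =>
      if w ≥ B.getD (k+1) 0 ∧ h ≥ C.getD (k+1) 0 then
        max (gDP A B C k h w) (gDP A B C k (h - C.getD (k+1) 0) (w - B.getD (k+1) 0) + A.getD (k+1) 0)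
      else gDP A B C k h w

-- array indexing / update helpers
lemma aModify_oob {α : Type} (T : Array α) (j : Nat) (f : α → α) (h : T.size ≤ j) :
    T.modify j f = T := by
  apply Array.ext (by simp)
  intro k hk1 hk2
  rw [Array.getElem_modify hk1, if_neg (by omega)]

lemma aModify_congr {α : Type} (T : Array α) (j : Nat) (f g : α → α)
    (h : ∀ hj : j < T.size, f T[j] = g T[j]) : T.modify j f = T.modify j g := by
  apply Array.ext (by simp)
  intro k hk1 hk2
  rw [Array.getElem_modify hk1, Array.getElem_modify hk2]
  split_ifs with he
  · subst he
    exact h (by simpa using hk1)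
  · rfl

lemma aModify_id {α : Type} (T : Array α) (j : Nat) : T.modify j (fun x => x) = T := by
  apply Array.ext (by simp)
  intro k hk1 hk2
  rw [Array.getElem_modify hk1]
  split_ifs <;> rfl

lemma aModify_modify {α : Type} (T : Array α) (j : Nat) (f g : α → α) :
    (T.modify j f).modify j g = T.modify j (fun x => g (f x)) := by
  apply Array.ext (by simp)
  intro k hk1 hk2
  rw [Array.getElem_modify hk1, Array.getElem_modify hk2,
    Array.getElem_modify (by simpa using hk2)]
  split_ifs <;> rfl

lemma aGetD_modify_self {α : Type} (T : Array α) (j : Nat) (f : α → α) (d : α)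
    (h : j < T.size) : (T.modify j f).getD j d = f (T.getD j d) := by
  rw [Array.getD_eq_getD_getElem?, Array.getD_eq_getD_getElem?, Array.getElem?_modify,
    if_pos rfl, Array.getElem?_eq_getElem h]
  rfl

lemma aGetD_modify_ne {α : Type} (T : Array α) (j k : Nat) (f : α → α) (d : α)
    (h : k ≠ j) : (T.modify j f).getD k d = T.getD k d := by
  rw [Array.getD_eq_getD_getElem?, Array.getD_eq_getD_getElem?, Array.getElem?_modify,
    if_neg (by omega)]

lemma aSet_twice {α : Type} (row : Array α) (w : Nat) (v v' : α) :
    (row.setIfInBounds w v).setIfInBounds w v' = row.setIfInBounds w v' := by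
  apply Array.ext (by simp)
  intro k hk1 hk2
  rw [Array.getElem_setIfInBounds (by simpa using hk1),
    Array.getElem_setIfInBounds (by simpa using hk1),
    Array.getElem_setIfInBounds (by simpa using hk2)]
  split_ifs <;> rfl

lemma aGetD_set_self {α : Type} (row : Array α) (w : Nat) (v d : α) (h : w < row.size) :
    (row.setIfInBounds w v).getD w d = v := by
  rw [Array.getD_eq_getD_getElem?, Array.getElem?_setIfInBounds, if_pos rfl, if_pos h]
  rfl

lemma aGetD_set_ne {α : Type} (row : Array α) (w u : Nat) (v d : α) (h : u ≠ w) :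
    (row.setIfInBounds w v).getD u d = row.getD u d := by
  rw [Array.getD_eq_getD_getElem?, Array.getD_eq_getD_getElem?, Array.getElem?_setIfInBounds,
    if_neg (by omega)]

lemma aSet_val_self {α : Type} (row : Array α) (w : Nat) (d : α) (h : w < row.size) :
    row.setIfInBounds w (row.getD w d) = row := by
  apply Array.ext (by simp)
  intro k hk1 hk2
  rw [Array.getElem_setIfInBounds (by simpa using hk1)]
  split_ifs with he
  · subst he
    simp [Array.getD_eq_getD_getElem?, Array.getElem?_eq_getElem h]
  · rfl

lemma aGetD_replicate {α : Type} (n j : Nat) (x d : α) (h : j < n) :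
    (Array.replicate n x).getD j d = x := by
  rw [Array.getD_eq_getD_getElem?, Array.getElem?_eq_getElem (by simpa using h),
    Array.getElem_replicate]
  rfl

lemma idx2_zero (mh mw h w : Int) :
    idx2 (Array.replicate (mh + 1).toNat (Array.replicate (mw + 1).toNat 0)) h w = 0 := by
  unfold idx2
  rcases Nat.lt_or_ge h.toNat (mh + 1).toNat with hlt | hge
  · rw [aGetD_replicate _ _ _ _ hlt]
    rcases Nat.lt_or_ge w.toNat (mw + 1).toNat with hw2 | hw2
    · rw [aGetD_replicate _ _ _ _ hw2]
    · rw [Array.getD_eq_getD_getElem?,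
        Array.getElem?_eq_none (by rw [Array.size_replicate]; exact hw2)]
      rfl
  · have hrow : (Array.replicate (mh + 1).toNat (Array.replicate (mw + 1).toNat (0 : Int))).getD
        h.toNat #[] = #[] := by
      rw [Array.getD_eq_getD_getElem?,
        Array.getElem?_eq_none (by rw [Array.size_replicate]; exact hge)]
      rfl
    rw [hrow]
    rfl

lemma dims_zero (mh mw : Int) :
    dimsT mh mw (Array.replicate (mh + 1).toNat (Array.replicate (mw + 1).toNat 0)) := by
  constructor
  · simp
  · intro j hj
    simp only [Array.size_replicate] at hj
    rw [aGetD_replicate _ _ _ _ hj]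
    simp

lemma length_set2 (T : Array (Array Int)) (h w v : Int) : (set2 T h w v).size = T.size := by
  simp [set2]

lemma getD_set2_ne (T : Array (Array Int)) (h w v : Int) (j : Nat) (hne : j ≠ h.toNat) :
    (set2 T h w v).getD j #[] = T.getD j #[] := by
  unfold set2
  exact aGetD_modify_ne T h.toNat j _ #[] hne

lemma getD_set2_self (T : Array (Array Int)) (h w v : Int) (hh : h.toNat < T.size) :
    (set2 T h w v).getD h.toNat #[] = (T.getD h.toNat #[]).setIfInBounds w.toNat v := by
  unfold set2
  exact aGetD_modify_self T h.toNat _ #[] hh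

lemma dims_set2 (mh mw : Int) (T : Array (Array Int)) (h w v : Int) (hd : dimsT mh mw T) :
    dimsT mh mw (set2 T h w v) := by
  obtain ⟨h1, h2⟩ := hd
  constructor
  · rw [length_set2]
    exact h1
  · intro j hj
    rw [length_set2] at hj
    rcases eq_or_ne j h.toNat with rfl | hne
    · rw [getD_set2_self T h w v hj, Array.size_setIfInBounds]
      exact h2 _ hj
    · rw [getD_set2_ne T h w v j hne]
      exact h2 _ hj

lemma idx2_set2_self (T : Array (Array Int)) (h w v : Int)
    (hh : h.toNat < T.size) (hw : w.toNat < (T.getD h.toNat #[]).size) :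
    idx2 (set2 T h w v) h w = v := by
  unfold idx2
  rw [getD_set2_self T h w v hh]
  exact aGetD_set_self _ w.toNat _ 0 hw

lemma idx2_set2_ne (T : Array (Array Int)) (h w v h' w' : Int)
    (hne : h'.toNat ≠ h.toNat ∨ w'.toNat ≠ w.toNat) :
    idx2 (set2 T h w v) h' w' = idx2 T h' w' := by
  unfold idx2
  rcases hne with hne | hne
  · rw [getD_set2_ne T h w v h'.toNat hne]
  · rcases eq_or_ne h'.toNat h.toNat with heq | hne2
    · rw [heq]
      rcases Nat.lt_or_ge h.toNat T.size with hlt | hge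
      · rw [getD_set2_self T h w v hlt]
        exact aGetD_set_ne _ w.toNat w'.toNat v 0 hne
      · have hset : set2 T h w v = T := by
          unfold set2
          exact aModify_oob T h.toNat _ hge
        rw [hset]
    · rw [getD_set2_ne T h w v h'.toNat hne2]

lemma set2_idx2_self (T : Array (Array Int)) (h w : Int)
    (hh : h.toNat < T.size) (hw : w.toNat < (T.getD h.toNat #[]).size) :
    set2 T h w (idx2 T h w) = T := by
  unfold set2 idx2
  have hrow : ∀ hj : h.toNat < T.size,
      T[h.toNat].setIfInBounds w.toNat ((T.getD h.toNat #[]).getD w.toNat 0) = T[h.toNat] := by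
    intro hj
    have hTe : T[h.toNat] = T.getD h.toNat #[] := by
      rw [Array.getD_eq_getD_getElem?, Array.getElem?_eq_getElem hj]
      rfl
    rw [hTe]
    exact aSet_val_self _ w.toNat 0 hw
  calc T.modify h.toNat (fun row => row.setIfInBounds w.toNat ((T.getD h.toNat #[]).getD w.toNat 0))
      = T.modify h.toNat (fun row => row) :=
        aModify_congr T h.toNat _ _ (fun hj => hrow hj)
    _ = T := aModify_id T h.toNat

lemma foldl_congr_inv {α β : Type} (inv : α → Prop) (f g : α → β → α) (l : List β) (x : α)
    (hx : inv x) (hfg : ∀ a b, inv a → b ∈ l → f a b = g a b)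
    (hf : ∀ a b, inv a → b ∈ l → inv (f a b)) : l.foldl f x = l.foldl g x := by
  induction l generalizing x with
  | nil => rfl
  | cons b l ih =>
    simp only [List.foldl_cons]
    have heq := hfg x b hx (by simp)
    rw [← heq]
    exact ih (f x b) (hf x b hx (by simp))
      (fun a b' ha hb' => hfg a b' ha (List.mem_cons_of_mem _ hb'))
      (fun a b' ha hb' => hf a b' ha (List.mem_cons_of_mem _ hb'))

lemma foldl_modify_layer {β : Type} (i p : Nat) (hne : p ≠ i)
    (step : Array (Array Int) → Array (Array Int) → β → Array (Array Int))
    (l : List β) (F : Array (Array (Array Int))) (hi : i < F.size) :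
    l.foldl (fun F x => F.modify i (fun T => step T (F.getD p #[]) x)) F
      = F.modify i (fun T => l.foldl (fun T x => step T (F.getD p #[]) x) T) := by
  induction l generalizing F with
  | nil =>
    simp only [List.foldl_nil]
    exact (aModify_id F i).symm
  | cons x xs ih =>
    simp only [List.foldl_cons]
    rw [ih _ (by simpa using hi)]
    rw [aGetD_modify_ne F i p (fun T => step T (F.getD p #[]) x) #[] hne]
    rw [aModify_modify]

lemma foldl_set2_inner (mh mw w a : Int) (V : Int → Int → Int) (T : Array (Array Int))
    (hd : dimsT mh mw T) (ha : 0 ≤ a) (hw0 : 0 ≤ w) (hw : w ≤ mw) :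
    dimsT mh mw ((PySem.List.pyRange a (mh + 1) 1).foldl
        (fun T h => set2 T h w (V (idx2 T h w) h)) T)
    ∧ ∀ h' w', 0 ≤ h' → h' ≤ mh → 0 ≤ w' → w' ≤ mw →
      idx2 ((PySem.List.pyRange a (mh + 1) 1).foldl
          (fun T h => set2 T h w (V (idx2 T h w) h)) T) h' w'
        = if a ≤ h' ∧ w' = w then V (idx2 T h' w') h' else idx2 T h' w' := by
  have key : ∀ (M : Nat) (a : Int) (T : Array (Array Int)), dimsT mh mw T → 0 ≤ a →
      ((mh + 1) - a).toNat = M →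
      dimsT mh mw ((PySem.List.pyRange a (mh + 1) 1).foldl
          (fun T h => set2 T h w (V (idx2 T h w) h)) T)
      ∧ ∀ h' w', 0 ≤ h' → h' ≤ mh → 0 ≤ w' → w' ≤ mw →
        idx2 ((PySem.List.pyRange a (mh + 1) 1).foldl
            (fun T h => set2 T h w (V (idx2 T h w) h)) T) h' w'
          = if a ≤ h' ∧ w' = w then V (idx2 T h' w') h' else idx2 T h' w' := by
    intro M
    induction M with
    | zero =>
      intro a T hdT ha hM
      rw [PySem.List.pyRange_one_eq_nil (by omega)]
      simp only [List.foldl_nil]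
      refine ⟨hdT, ?_⟩
      intro h' w' h'0 h'mh w'0 w'mw
      rw [if_neg (by rintro ⟨h1, -⟩; omega)]
    | succ M ih =>
      intro a T hdT ha hM
      rw [PySem.List.pyRange_one_cons (by omega)]
      simp only [List.foldl_cons]
      have hd1 : dimsT mh mw (set2 T a w (V (idx2 T a w) a)) := dims_set2 _ _ _ _ _ _ hdT
      have hrec := ih (a + 1) _ hd1 (by omega) (by omega)
      refine ⟨hrec.1, ?_⟩
      intro h' w' h'0 h'mh w'0 w'mw
      rw [hrec.2 h' w' h'0 h'mh w'0 w'mw]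
      have hhb : a.toNat < T.size := by
        rw [hdT.1]; omega
      have hwb : w.toNat < (T.getD a.toNat #[]).size := by
        rw [hdT.2 a.toNat hhb]; omega
      by_cases hc1 : a + 1 ≤ h'
      · have hne : h'.toNat ≠ a.toNat ∨ w'.toNat ≠ w.toNat := Or.inl (by omega)
        rw [idx2_set2_ne T a w _ h' w' hne]
        by_cases hc2 : w' = w
        · rw [if_pos ⟨hc1, hc2⟩, if_pos ⟨by omega, hc2⟩]
        · rw [if_neg (by rintro ⟨-, h2⟩; exact hc2 h2), if_neg (by rintro ⟨-, h2⟩; exact hc2 h2)]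
      · rw [if_neg (by rintro ⟨h1, -⟩; omega)]
        by_cases hc2 : h' = a ∧ w' = w
        · obtain ⟨rfl, rfl⟩ := hc2
          rw [idx2_set2_self T h' w' _ hhb hwb, if_pos ⟨by omega, rfl⟩]
        · have hne : h'.toNat ≠ a.toNat ∨ w'.toNat ≠ w.toNat := by
            by_cases he : h' = a
            · exact Or.inr (by have : ¬ w' = w := fun hw2 => hc2 ⟨he, hw2⟩; omega)
            · exact Or.inl (by omega)
          rw [idx2_set2_ne T a w _ h' w' hne]
          rw [if_neg (by rintro ⟨h1, h2⟩; exact hc2 ⟨by omega, h2⟩)]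
  exact key ((mh + 1) - a).toNat a T hd ha rfl

lemma foldl_set2_outer (mh mw a : Int) (V : Int → Int → Int → Int) (T : Array (Array Int))
    (hd : dimsT mh mw T) (ha : 0 ≤ a) (hmh : 0 ≤ mh) :
    dimsT mh mw ((PySem.List.pyRange a (mw + 1) 1).foldl
        (fun T w => (PySem.List.pyRange 0 (mh + 1) 1).foldl
          (fun T h => set2 T h w (V (idx2 T h w) h w)) T) T)
    ∧ ∀ h' w', 0 ≤ h' → h' ≤ mh → 0 ≤ w' → w' ≤ mw →
      idx2 ((PySem.List.pyRange a (mw + 1) 1).foldl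
          (fun T w => (PySem.List.pyRange 0 (mh + 1) 1).foldl
            (fun T h => set2 T h w (V (idx2 T h w) h w)) T) T) h' w'
        = if a ≤ w' then V (idx2 T h' w') h' w' else idx2 T h' w' := by
  have key : ∀ (M : Nat) (a : Int) (T : Array (Array Int)), dimsT mh mw T → 0 ≤ a →
      ((mw + 1) - a).toNat = M →
      dimsT mh mw ((PySem.List.pyRange a (mw + 1) 1).foldl
          (fun T w => (PySem.List.pyRange 0 (mh + 1) 1).foldl
            (fun T h => set2 T h w (V (idx2 T h w) h w)) T) T)
      ∧ ∀ h' w', 0 ≤ h' → h' ≤ mh → 0 ≤ w' → w' ≤ mw →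
        idx2 ((PySem.List.pyRange a (mw + 1) 1).foldl
            (fun T w => (PySem.List.pyRange 0 (mh + 1) 1).foldl
              (fun T h => set2 T h w (V (idx2 T h w) h w)) T) T) h' w'
          = if a ≤ w' then V (idx2 T h' w') h' w' else idx2 T h' w' := by
    intro M
    induction M with
    | zero =>
      intro a T hdT ha hM
      rw [PySem.List.pyRange_one_eq_nil (show mw + 1 ≤ a by omega)]
      simp only [List.foldl_nil]
      refine ⟨hdT, ?_⟩
      intro h' w' h'0 h'mh w'0 w'mw
      rw [if_neg (show ¬ a ≤ w' by omega)]
    | succ M ih =>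
      intro a T hdT ha hM
      rw [PySem.List.pyRange_one_cons (show a < mw + 1 by omega)]
      simp only [List.foldl_cons]
      have hinner := foldl_set2_inner mh mw a 0 (fun old h => V old h a) T hdT le_rfl ha (by omega)
      beta_reduce at hinner
      have hrec := ih (a + 1) _ hinner.1 (by omega) (by omega)
      refine ⟨hrec.1, ?_⟩
      intro h' w' h'0 h'mh w'0 w'mw
      rw [hrec.2 h' w' h'0 h'mh w'0 w'mw]
      by_cases hc1 : a + 1 ≤ w'
      · rw [if_pos hc1, if_pos (show a ≤ w' by omega),
          hinner.2 h' w' h'0 h'mh w'0 w'mw, if_neg (by rintro ⟨-, h2⟩; omega)]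
      · rw [if_neg hc1]
        by_cases hc2 : w' = a
        · subst hc2
          rw [hinner.2 h' w' h'0 h'mh w'0 w'mw, if_pos ⟨h'0, rfl⟩, if_pos le_rfl]
        · rw [hinner.2 h' w' h'0 h'mh w'0 w'mw, if_neg (by rintro ⟨-, h2⟩; exact hc2 h2),
            if_neg (show ¬ a ≤ w' by omega)]
  exact key ((mw + 1) - a).toNat a T hd ha rfl

lemma set2_set2' (T : Array (Array Int)) (h w v v' : Int) :
    set2 (set2 T h w v) h w v' = set2 T h w v' := by
  unfold set2
  rw [aModify_modify]
  exact aModify_congr T h.toNat _ _ (fun hj => aSet_twice _ w.toNat v v')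

lemma dims_layers_modify (mh mw : Int) (F : Array (Array (Array Int))) (j : Nat)
    (f : Array (Array Int) → Array (Array Int))
    (hF : ∀ l < F.size, dimsT mh mw (F.getD l #[]))
    (hf : dimsT mh mw (f (F.getD j #[]))) :
    ∀ l < (F.modify j f).size, dimsT mh mw ((F.modify j f).getD l #[]) := by
  intro l hl
  rw [Array.size_modify] at hl
  rcases eq_or_ne l j with rfl | hne
  · rw [aGetD_modify_self _ _ _ _ hl]
    exact hf
  · rw [aGetD_modify_ne _ _ _ _ _ hne]
    exact hF l hl

-- the base (item-0) loop of port A: layer 0 realizes gDP 0, everything stays well-dimensioned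
lemma base_layer (A B C : List Int) (mw mh : Int)
    (hn : 1 ≤ A.length) (hmw : 0 ≤ mw) (hmh : 0 ≤ mh) :
    ((PySem.List.pyRange 0 (mw + 1) 1).foldl (fun F w =>
      (PySem.List.pyRange 0 (mh + 1) 1).foldl (fun F h =>
        if B.getD 0 0 ≤ w ∧ C.getD 0 0 ≤ h then set3 F 0 h w (A.getD 0 0) else F) F)
      (Array.replicate A.length (Array.replicate (mh + 1).toNat (Array.replicate (mw + 1).toNat 0)))).size = A.length
    ∧ (∀ j < A.length, dimsT mh mw (((PySem.List.pyRange 0 (mw + 1) 1).foldl (fun F w =>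
        (PySem.List.pyRange 0 (mh + 1) 1).foldl (fun F h =>
          if B.getD 0 0 ≤ w ∧ C.getD 0 0 ≤ h then set3 F 0 h w (A.getD 0 0) else F) F)
        (Array.replicate A.length (Array.replicate (mh + 1).toNat (Array.replicate (mw + 1).toNat 0)))).getD j #[]))
    ∧ ∀ h w, 0 ≤ h → h ≤ mh → 0 ≤ w → w ≤ mw →
      idx2 (((PySem.List.pyRange 0 (mw + 1) 1).foldl (fun F w =>
        (PySem.List.pyRange 0 (mh + 1) 1).foldl (fun F h =>
          if B.getD 0 0 ≤ w ∧ C.getD 0 0 ≤ h then set3 F 0 h w (A.getD 0 0) else F) F)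
        (Array.replicate A.length (Array.replicate (mh + 1).toNat (Array.replicate (mw + 1).toNat 0)))).getD 0 #[]) h w
        = gDP A B C 0 h w := by
  have h0F : 0 < A.length := hn
  set inv := fun F : Array (Array (Array Int)) =>
    F.size = A.length ∧ ∀ j < F.size, dimsT mh mw (F.getD j #[]) with hinvdef
  set Z2 := Array.replicate (mh + 1).toNat (Array.replicate (mw + 1).toNat (0 : Int)) with hZ2
  set F0 := Array.replicate A.length Z2 with hF0
  have hinvF0 : inv F0 := by
    refine ⟨by simp [hF0], ?_⟩
    intro j hj
    rw [hF0, Array.size_replicate] at hj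
    rw [hF0, aGetD_replicate _ _ _ _ hj]
    exact dims_zero mh mw
  set V := fun (old h w : Int) =>
    if B.getD 0 0 ≤ w ∧ C.getD 0 0 ≤ h then A.getD 0 0 else old with hV
  set g := fun (F : Array (Array (Array Int))) (w : Int) =>
    F.modify 0 (fun T => (PySem.List.pyRange 0 (mh + 1) 1).foldl
      (fun T h => set2 T h w (V (idx2 T h w) h w)) T) with hg
  have hgstep : ∀ (F : Array (Array (Array Int))) (w : Int), inv F → 0 ≤ w → w ≤ mw →
      ((PySem.List.pyRange 0 (mh + 1) 1).foldl (fun F h =>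
        if B.getD 0 0 ≤ w ∧ C.getD 0 0 ≤ h then set3 F 0 h w (A.getD 0 0) else F) F) = g F w
      ∧ inv (g F w) := by
    intro F w hF w0 wmw
    constructor
    · have hcon : (PySem.List.pyRange 0 (mh + 1) 1).foldl (fun F h =>
          if B.getD 0 0 ≤ w ∧ C.getD 0 0 ≤ h then set3 F 0 h w (A.getD 0 0) else F) F
          = (PySem.List.pyRange 0 (mh + 1) 1).foldl (fun F h =>
            F.modify 0 (fun T => set2 T h w (V (idx2 T h w) h w))) F := by
        apply foldl_congr_inv inv _ _ _ F hF
        · intro F h hFi hmem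
          have hhb : 0 ≤ h ∧ h < mh + 1 := by
            simpa using (PySem.List.mem_pyRange_one.mp hmem)
          have hd0' : dimsT mh mw (F.getD 0 #[]) := hFi.2 0 (by omega)
          by_cases hc : B.getD 0 0 ≤ w ∧ C.getD 0 0 ≤ h
          · rw [if_pos hc]
            unfold set3
            apply aModify_congr
            intro hj
            beta_reduce
            have hVval : V (idx2 F[(0 : Int).toNat] h w) h w = A.getD 0 0 := by
              rw [hV]
              dsimp only
              rw [if_pos hc]
            rw [hVval]
          · rw [if_neg hc]
            calc F = F.modify 0 (fun T => T) := (aModify_id F 0).symm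
              _ = _ := by
                apply aModify_congr
                intro hj
                beta_reduce
                have hTe : F[(0 : Nat)] = F.getD 0 #[] := by
                  rw [Array.getD_eq_getD_getElem?, Array.getElem?_eq_getElem hj]
                  rfl
                have hVval : V (idx2 F[(0 : Nat)] h w) h w = idx2 F[(0 : Nat)] h w := by
                  rw [hV]
                  dsimp only
                  rw [if_neg hc]
                rw [hVval, hTe]
                exact (set2_idx2_self _ h w (by rw [hd0'.1]; omega)
                  (by rw [hd0'.2 h.toNat (by rw [hd0'.1]; omega)]; omega)).symm
        · intro F h hFi hmem
          by_cases hc : B.getD 0 0 ≤ w ∧ C.getD 0 0 ≤ h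
          · rw [if_pos hc]
            have hd0' : dimsT mh mw (F.getD 0 #[]) := hFi.2 0 (by omega)
            exact ⟨by simp only [set3, Array.size_modify]; exact hFi.1, by
              simpa [set3] using dims_layers_modify mh mw F 0 _ hFi.2
                (dims_set2 _ _ _ _ _ _ hd0')⟩
          · rw [if_neg hc]
            exact hFi
      rw [hcon, hg]
      exact foldl_modify_layer 0 1 (by omega)
        (fun T P h => set2 T h w (V (idx2 T h w) h w))
        (PySem.List.pyRange 0 (mh + 1) 1) F (by rw [hF.1]; omega)
    · have hdi := (foldl_set2_inner mh mw w 0 (fun old h => V old h w) (F.getD 0 #[])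
        (hF.2 0 (by rw [hF.1]; omega)) le_rfl w0 wmw).1
      beta_reduce at hdi
      exact ⟨by simp [hg, hF.1], dims_layers_modify mh mw F 0 _ hF.2 hdi⟩
  have hcong : (PySem.List.pyRange 0 (mw + 1) 1).foldl (fun F w =>
      (PySem.List.pyRange 0 (mh + 1) 1).foldl (fun F h =>
        if B.getD 0 0 ≤ w ∧ C.getD 0 0 ≤ h then set3 F 0 h w (A.getD 0 0) else F) F) F0
      = (PySem.List.pyRange 0 (mw + 1) 1).foldl g F0 := by
    apply foldl_congr_inv inv _ _ _ F0 hinvF0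
    · intro F w hF hmem
      have hwb : 0 ≤ w ∧ w < mw + 1 := by simpa using (PySem.List.mem_pyRange_one.mp hmem)
      exact (hgstep F w hF hwb.1 (by omega)).1
    · intro F w hF hmem
      have hwb : 0 ≤ w ∧ w < mw + 1 := by simpa using (PySem.List.mem_pyRange_one.mp hmem)
      rw [(hgstep F w hF hwb.1 (by omega)).1]
      exact (hgstep F w hF hwb.1 (by omega)).2
  have hfact : (PySem.List.pyRange 0 (mw + 1) 1).foldl g F0
      = F0.modify 0 (fun T => (PySem.List.pyRange 0 (mw + 1) 1).foldl (fun T w =>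
          (PySem.List.pyRange 0 (mh + 1) 1).foldl
            (fun T h => set2 T h w (V (idx2 T h w) h w)) T) T) := by
    exact foldl_modify_layer 0 1 (by omega)
      (fun T P w => (PySem.List.pyRange 0 (mh + 1) 1).foldl
        (fun T h => set2 T h w (V (idx2 T h w) h w)) T)
      (PySem.List.pyRange 0 (mw + 1) 1) F0 (by simp [hF0]; omega)
  have hZ2eq : F0.getD 0 #[] = Z2 := by
    rw [hF0]
    exact aGetD_replicate _ _ _ _ h0F
  have houter := foldl_set2_outer mh mw 0 V Z2 (dims_zero mh mw) le_rfl hmh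
  rw [hcong, hfact]
  refine ⟨by simp [hF0], ?_, ?_⟩
  · intro j hj
    exact dims_layers_modify mh mw F0 0 _ hinvF0.2
      (by rw [hZ2eq]; exact houter.1) j
      (by rw [Array.size_modify, hF0, Array.size_replicate]; exact hj)
  · intro h w h0 hmh' w0 wmw
    rw [aGetD_modify_self _ _ _ _ (by rw [hF0, Array.size_replicate]; omega)]
    beta_reduce
    rw [hZ2eq]
    rw [houter.2 h w h0 hmh' w0 wmw, if_pos w0, idx2_zero]
    simp [hV, gDP]

-- the main item loop of port A: final layer n-1 realizes gDP (n-1)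
lemma main_layers (A B C : List Int) (mw mh : Int)
    (hn : 1 ≤ A.length) (hmw : 0 ≤ mw) (hmh : 0 ≤ mh)
    (hBC : ∀ k, 1 ≤ k → k < A.length →
      (B.getD k 0 ≤ mw → 0 ≤ C.getD k 0) ∧ (B.getD k 0 < 0 → mh < C.getD k 0)) :
    ∀ (i : Int), 1 ≤ i → i ≤ (A.length : Int) →
    ∀ F : Array (Array (Array Int)), F.size = A.length →
    (∀ j < F.size, dimsT mh mw (F.getD j #[])) →
    (∀ h w, 0 ≤ h → h ≤ mh → 0 ≤ w → w ≤ mw →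
      idx2 (F.getD (i - 1).toNat #[]) h w = gDP A B C (i - 1).toNat h w) →
    ∀ h w, 0 ≤ h → h ≤ mh → 0 ≤ w → w ≤ mw →
      idx2 (((PySem.List.pyRange i (A.length : Int) 1).foldl (fun F i =>
        (PySem.List.pyRange 0 (mw + 1) 1).foldl (fun F w =>
          (PySem.List.pyRange 0 (mh + 1) 1).foldl (fun F h =>
            let F' := set3 F i h w (idx3 F (i - 1) h w)
            if w ≥ B.getD i.toNat 0 ∧ h ≥ C.getD i.toNat 0 then
              set3 F' i h w (max (idx3 F' i h w)
                (idx3 F' (i - 1) (h - C.getD i.toNat 0) (w - B.getD i.toNat 0) + A.getD i.toNat 0))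
            else F') F) F) F).getD (A.length - 1) #[]) h w
        = gDP A B C (A.length - 1) h w := by
  set n := A.length with hn'
  set inv := fun F : Array (Array (Array Int)) =>
    F.size = n ∧ ∀ j < F.size, dimsT mh mw (F.getD j #[]) with hinvdef
  -- one item step, factored to a 2D fold on layer i with the previous layer fixed
  have hitem : ∀ (i : Int), 1 ≤ i → i < (n : Int) → ∀ F, inv F →
      (∀ h w, 0 ≤ h → h ≤ mh → 0 ≤ w → w ≤ mw →
        idx2 (F.getD (i - 1).toNat #[]) h w = gDP A B C (i - 1).toNat h w) →
      ∃ G, ((PySem.List.pyRange 0 (mw + 1) 1).foldl (fun F w =>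
          (PySem.List.pyRange 0 (mh + 1) 1).foldl (fun F h =>
            let F' := set3 F i h w (idx3 F (i - 1) h w)
            if w ≥ B.getD i.toNat 0 ∧ h ≥ C.getD i.toNat 0 then
              set3 F' i h w (max (idx3 F' i h w)
                (idx3 F' (i - 1) (h - C.getD i.toNat 0) (w - B.getD i.toNat 0) + A.getD i.toNat 0))
            else F') F) F) = G
        ∧ inv G
        ∧ (∀ h w, 0 ≤ h → h ≤ mh → 0 ≤ w → w ≤ mw →
            idx2 (G.getD i.toNat #[]) h w = gDP A B C i.toNat h w)
        ∧ (∀ j, j ≠ i.toNat → G.getD j #[] = F.getD j #[]) := by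
    intro i hi1 hilt F hF hprev
    have hiF : i.toNat < F.size := by rw [hF.1]; omega
    have hine : (i - 1).toNat ≠ i.toNat := by omega
    set prev := F.getD (i - 1).toNat #[] with hprevdef
    set Vi := fun (old h w : Int) =>
      if w ≥ B.getD i.toNat 0 ∧ h ≥ C.getD i.toNat 0 then
        max (idx2 prev h w) (idx2 prev (h - C.getD i.toNat 0) (w - B.getD i.toNat 0) + A.getD i.toNat 0)
      else idx2 prev h w with hVi
    -- the rewritten outer body
    set g := fun (F' : Array (Array (Array Int))) (w : Int) =>
      F'.modify i.toNat (fun T => (PySem.List.pyRange 0 (mh + 1) 1).foldl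
        (fun T h => set2 T h w (Vi (idx2 T h w) h w)) T) with hg
    have hgstep : ∀ (F' : Array (Array (Array Int))) (w : Int), inv F' →
        (F'.getD (i - 1).toNat #[] = prev) → 0 ≤ w → w ≤ mw →
        ((PySem.List.pyRange 0 (mh + 1) 1).foldl (fun F h =>
          let F'' := set3 F i h w (idx3 F (i - 1) h w)
          if w ≥ B.getD i.toNat 0 ∧ h ≥ C.getD i.toNat 0 then
            set3 F'' i h w (max (idx3 F'' i h w)
              (idx3 F'' (i - 1) (h - C.getD i.toNat 0) (w - B.getD i.toNat 0) + A.getD i.toNat 0))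
          else F'') F') = g F' w
        ∧ inv (g F' w) ∧ (g F' w).getD (i - 1).toNat #[] = prev := by
      intro F' w hF' hpv w0 wmw
      have hiF' : i.toNat < F'.size := by rw [hF'.1]; omega
      have hcon : (PySem.List.pyRange 0 (mh + 1) 1).foldl (fun F h =>
          let F'' := set3 F i h w (idx3 F (i - 1) h w)
          if w ≥ B.getD i.toNat 0 ∧ h ≥ C.getD i.toNat 0 then
            set3 F'' i h w (max (idx3 F'' i h w)
              (idx3 F'' (i - 1) (h - C.getD i.toNat 0) (w - B.getD i.toNat 0) + A.getD i.toNat 0))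
          else F'') F'
          = (PySem.List.pyRange 0 (mh + 1) 1).foldl (fun F h =>
            F.modify i.toNat (fun T => set2 T h w (Vi (idx2 T h w) h w))) F' := by
        apply foldl_congr_inv (fun F => inv F ∧ F.getD (i - 1).toNat #[] = prev) _ _ _ F'
          ⟨hF', hpv⟩
        · intro F h hFi hmem
          have hhb : 0 ≤ h ∧ h < mh + 1 := by
            simpa using (PySem.List.mem_pyRange_one.mp hmem)
          have hiFl : i.toNat < F.size := by rw [hFi.1.1]; omega
          have hdrow : dimsT mh mw (F.getD i.toNat #[]) := hFi.1.2 i.toNat hiFl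
          have hhrow : h.toNat < (F.getD i.toNat #[]).size := by rw [hdrow.1]; omega
          have e1 : ∀ v : Int, (set3 F i h w v).getD i.toNat #[]
              = set2 (F.getD i.toNat #[]) h w v := by
            intro v
            unfold set3
            exact aGetD_modify_self _ _ _ _ hiFl
          have e3 : ∀ v : Int, idx3 (set3 F i h w v) i h w = v := by
            intro v
            unfold idx3
            rw [e1 v]
            exact idx2_set2_self _ _ _ _ hhrow (by rw [hdrow.2 h.toNat hhrow]; omega)
          have e4 : ∀ v x y : Int, idx3 (set3 F i h w v) (i - 1) x y
              = idx2 (F.getD (i - 1).toNat #[]) x y := by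
            intro v x y
            unfold idx3 set3
            rw [aGetD_modify_ne _ _ _ _ _ hine]
          have e5 : ∀ u v : Int, set3 (set3 F i h w u) i h w v
              = F.modify i.toNat (fun T => set2 T h w v) := by
            intro u v
            unfold set3
            rw [aModify_modify]
            exact aModify_congr _ _ _ _ (fun hj => set2_set2' _ h w u v)
          dsimp only
          by_cases hc : w ≥ B.getD i.toNat 0 ∧ h ≥ C.getD i.toNat 0
          · rw [if_pos hc, e3, e4, e5]
            apply aModify_congr
            intro hj
            beta_reduce
            have hVval : Vi (idx2 F[i.toNat] h w) h w
                = max (idx2 prev h w)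
                    (idx2 prev (h - C.getD i.toNat 0) (w - B.getD i.toNat 0) + A.getD i.toNat 0) := by
              rw [hVi]
              dsimp only
              rw [if_pos hc]
            rw [hVval]
            unfold idx3
            rw [hFi.2]
          · rw [if_neg hc]
            unfold set3
            apply aModify_congr
            intro hj
            beta_reduce
            have hVval : Vi (idx2 F[i.toNat] h w) h w = idx2 prev h w := by
              rw [hVi]
              dsimp only
              rw [if_neg hc]
            rw [hVval]
            unfold idx3
            rw [hFi.2]
        · intro F h hFi hmem
          have hiFl : i.toNat < F.size := by rw [hFi.1.1]; omega
          have hdrow : dimsT mh mw (F.getD i.toNat #[]) := hFi.1.2 i.toNat hiFl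
          have hinv2 : ∀ v : Int, (inv (set3 F i h w v) ∧
              (set3 F i h w v).getD (i - 1).toNat #[] = prev) := by
            intro v
            refine ⟨⟨by simp only [set3, Array.size_modify]; exact hFi.1.1, by
              simpa [set3] using dims_layers_modify mh mw F i.toNat _ hFi.1.2
                (dims_set2 _ _ _ _ _ _ hdrow)⟩, ?_⟩
            unfold set3
            rw [aGetD_modify_ne _ _ _ _ _ hine]
            exact hFi.2
          dsimp only
          by_cases hc : w ≥ B.getD i.toNat 0 ∧ h ≥ C.getD i.toNat 0
          · rw [if_pos hc]
            have h1 := hinv2 (idx3 F (i - 1) h w)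
            have hd2 : dimsT mh mw ((set3 F i h w (idx3 F (i - 1) h w)).getD i.toNat #[]) :=
              h1.1.2 i.toNat (by rw [h1.1.1]; omega)
            refine ⟨⟨by simp only [set3, Array.size_modify]; exact hFi.1.1, by
              simpa [set3] using dims_layers_modify mh mw _ i.toNat _ h1.1.2
                (dims_set2 _ _ _ _ _ _ hd2)⟩, ?_⟩
            unfold set3
            rw [aGetD_modify_ne _ _ _ _ _ hine]
            exact h1.2
          · rw [if_neg hc]
            exact hinv2 (idx3 F (i - 1) h w)
      have hfac : (PySem.List.pyRange 0 (mh + 1) 1).foldl (fun F h =>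
          F.modify i.toNat (fun T => set2 T h w (Vi (idx2 T h w) h w))) F'
          = g F' w := by
        rw [hg]
        exact foldl_modify_layer i.toNat (i - 1).toNat hine
          (fun T P h => set2 T h w (Vi (idx2 T h w) h w))
          (PySem.List.pyRange 0 (mh + 1) 1) F' hiF'
      refine ⟨hcon.trans hfac, ?_, ?_⟩
      · have hdl : dimsT mh mw (F'.getD i.toNat #[]) := hF'.2 i.toNat hiF'
        have hdi := (foldl_set2_inner mh mw w 0 (fun old h => Vi old h w)
          (F'.getD i.toNat #[]) hdl le_rfl w0 wmw).1
        beta_reduce at hdi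
        exact ⟨by simp [hg, hF'.1], dims_layers_modify mh mw F' i.toNat _ hF'.2 hdi⟩
      · rw [hg]
        dsimp only
        rw [aGetD_modify_ne _ _ _ _ _ hine]
        exact hpv
    -- outer loop over w
    have hcong : (PySem.List.pyRange 0 (mw + 1) 1).foldl (fun F w =>
        (PySem.List.pyRange 0 (mh + 1) 1).foldl (fun F h =>
          let F' := set3 F i h w (idx3 F (i - 1) h w)
          if w ≥ B.getD i.toNat 0 ∧ h ≥ C.getD i.toNat 0 then
            set3 F' i h w (max (idx3 F' i h w)
              (idx3 F' (i - 1) (h - C.getD i.toNat 0) (w - B.getD i.toNat 0) + A.getD i.toNat 0))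
          else F') F) F
        = (PySem.List.pyRange 0 (mw + 1) 1).foldl g F := by
      apply foldl_congr_inv (fun F => inv F ∧ F.getD (i - 1).toNat #[] = prev) _ _ _ F ⟨hF, rfl⟩
      · intro F' w hF' hmem
        have hwb : 0 ≤ w ∧ w < mw + 1 := by simpa using (PySem.List.mem_pyRange_one.mp hmem)
        exact (hgstep F' w hF'.1 hF'.2 hwb.1 (by omega)).1
      · intro F' w hF' hmem
        have hwb : 0 ≤ w ∧ w < mw + 1 := by simpa using (PySem.List.mem_pyRange_one.mp hmem)
        rw [(hgstep F' w hF'.1 hF'.2 hwb.1 (by omega)).1]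
        exact ⟨(hgstep F' w hF'.1 hF'.2 hwb.1 (by omega)).2.1,
          (hgstep F' w hF'.1 hF'.2 hwb.1 (by omega)).2.2⟩
    have hfact : (PySem.List.pyRange 0 (mw + 1) 1).foldl g F
        = F.modify i.toNat (fun T => (PySem.List.pyRange 0 (mw + 1) 1).foldl (fun T w =>
            (PySem.List.pyRange 0 (mh + 1) 1).foldl
              (fun T h => set2 T h w (Vi (idx2 T h w) h w)) T) T) := by
      exact foldl_modify_layer i.toNat (i - 1).toNat hine
        (fun T P w => (PySem.List.pyRange 0 (mh + 1) 1).foldl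
          (fun T h => set2 T h w (Vi (idx2 T h w) h w)) T)
        (PySem.List.pyRange 0 (mw + 1) 1) F hiF
    have hdl : dimsT mh mw (F.getD i.toNat #[]) := hF.2 i.toNat hiF
    have houter := foldl_set2_outer mh mw 0 Vi (F.getD i.toNat #[]) hdl le_rfl hmh
    refine ⟨_, hcong.trans hfact, ?_, ?_, ?_⟩
    · exact ⟨by simp [hF.1], dims_layers_modify mh mw F i.toNat _ hF.2 houter.1⟩
    · intro h w h0 hmh' w0 wmw
      rw [aGetD_modify_self _ _ _ _ hiF]
      beta_reduce
      rw [houter.2 h w h0 hmh' w0 wmw, if_pos w0]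
      -- now the value analysis
      have hk : i.toNat = (i - 1).toNat + 1 := by omega
      rw [hVi]
      dsimp only
      by_cases hc : w ≥ B.getD i.toNat 0 ∧ h ≥ C.getD i.toNat 0
      · rw [if_pos hc]
        have hBCi := hBC i.toNat (by omega) (by omega : i.toNat < A.length)
        have hc0 : 0 ≤ C.getD i.toNat 0 := hBCi.1 (by omega)
        have hb0 : 0 ≤ B.getD i.toNat 0 := by
          by_contra hb
          have := hBCi.2 (by omega)
          omega
        rw [hprev h w h0 hmh' w0 wmw]
        rw [hprev (h - C.getD i.toNat 0) (w - B.getD i.toNat 0)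
          (by omega) (by omega) (by omega) (by omega)]
        rw [hk, gDP]
        dsimp only
        rw [if_pos (show w ≥ B.getD ((i - 1).toNat + 1) 0 ∧ h ≥ C.getD ((i - 1).toNat + 1) 0 by
          rw [← hk]; exact hc)]
      · rw [if_neg hc]
        rw [hprev h w h0 hmh' w0 wmw]
        rw [hk, gDP]
        dsimp only
        rw [if_neg (show ¬ (w ≥ B.getD ((i - 1).toNat + 1) 0 ∧ h ≥ C.getD ((i - 1).toNat + 1) 0) by
          rw [← hk]; exact hc)]
    · intro j hj
      exact aGetD_modify_ne _ _ _ _ _ hj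
  -- induction over the item loop
  have key : ∀ (M : Nat) (i : Int), 1 ≤ i → i ≤ (n : Int) → ((n : Int) - i).toNat = M →
      ∀ F : Array (Array (Array Int)), inv F →
      (∀ h w, 0 ≤ h → h ≤ mh → 0 ≤ w → w ≤ mw →
        idx2 (F.getD (i - 1).toNat #[]) h w = gDP A B C (i - 1).toNat h w) →
      ∀ h w, 0 ≤ h → h ≤ mh → 0 ≤ w → w ≤ mw →
        idx2 (((PySem.List.pyRange i (n : Int) 1).foldl (fun F i =>
          (PySem.List.pyRange 0 (mw + 1) 1).foldl (fun F w =>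
            (PySem.List.pyRange 0 (mh + 1) 1).foldl (fun F h =>
              let F' := set3 F i h w (idx3 F (i - 1) h w)
              if w ≥ B.getD i.toNat 0 ∧ h ≥ C.getD i.toNat 0 then
                set3 F' i h w (max (idx3 F' i h w)
                  (idx3 F' (i - 1) (h - C.getD i.toNat 0) (w - B.getD i.toNat 0) + A.getD i.toNat 0))
              else F') F) F) F).getD (n - 1) #[]) h w
          = gDP A B C (n - 1) h w := by
    intro M
    induction M with
    | zero =>
      intro i hi1 hile hM F hF hprev h w h0 hmh' w0 wmw
      rw [PySem.List.pyRange_one_eq_nil (show (n : Int) ≤ i by omega)]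
      simp only [List.foldl_nil]
      have hieq : (i - 1).toNat = n - 1 := by omega
      rw [← hieq]
      exact hprev h w h0 hmh' w0 wmw
    | succ M ih =>
      intro i hi1 hile hM F hF hprev h w h0 hmh' w0 wmw
      rw [PySem.List.pyRange_one_cons (show i < (n : Int) by omega)]
      simp only [List.foldl_cons]
      obtain ⟨G, hGeq, hGinv, hGval, hGoth⟩ := hitem i hi1 (by omega) F hF hprev
      rw [hGeq]
      have hieq : ((i + 1) - 1).toNat = i.toNat := by omega
      exact ih (i + 1) (by omega) (by omega) (by omega) G hGinv
        (by rw [hieq]; exact hGval) h w h0 hmh' w0 wmw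
  intro i hi1 hile F hFlen hFdims hprev h w h0 hmh' w0 wmw
  exact key ((n : Int) - i).toNat i hi1 hile rfl F ⟨hFlen, hFdims⟩ hprev h w h0 hmh' w0 wmw

lemma A_value (A B C : List Int) (mw mh : Int)
    (hn : 1 ≤ A.length) (hmw : 0 ≤ mw) (hmh : 0 ≤ mh)
    (hBC : ∀ k, 1 ≤ k → k < A.length →
      (B.getD k 0 ≤ mw → 0 ≤ C.getD k 0) ∧ (B.getD k 0 < 0 → mh < C.getD k 0)) :
    knapsack_2d A B C mw mh = gDP A B C (A.length - 1) mh mw := by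
  have hbase := base_layer A B C mw mh hn hmw hmh
  simp only [knapsack_2d]
  unfold idx3
  rw [show ((A.length : Int) - 1).toNat = A.length - 1 by omega]
  exact main_layers A B C mw mh hn hmw hmh hBC 1 le_rfl (by exact_mod_cast hn) _
    hbase.1
    (fun j hj => hbase.2.1 j (by rw [← hbase.1]; exact hj))
    (by
      intro h w h0 hh w0 hw
      rw [show ((1 : Int) - 1).toNat = 0 by omega]
      exact hbase.2.2 h w h0 hh w0 hw)
    mh mw hmh le_rfl hmw le_rfl

-- B-side: the memo invariant — every stored value is the DP value of its key
def memoOK (A B C : List Int) (memo : PySem.Dict (Nat × Int × Int) Int) : Prop :=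
  ∀ k w h v, memo.get? (k, w, h) = some v → v = gDP A B C k h w

lemma memoOK_empty (A B C : List Int) : memoOK A B C PySem.Dict.empty := by
  intro k w h v hv
  rw [PySem.Dict.get?_empty] at hv
  exact absurd hv (by simp)

lemma memoOK_insert (A B C : List Int) (memo : PySem.Dict (Nat × Int × Int) Int)
    (i : Nat) (w h : Int) (hm : memoOK A B C memo) :
    memoOK A B C (memo.insert (i, w, h) (gDP A B C i h w)) := by
  intro k w' h' v hv
  rw [PySem.Dict.get?_insert] at hv
  split_ifs at hv with he
  · simp only [Prod.mk.injEq] at he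
    obtain ⟨rfl, rfl, rfl⟩ := he
    exact (Option.some.inj hv).symm
  · exact hm k w' h' v hv

-- bestB computes gDP and preserves the memo invariant (for ALL capacities: the recurrence
-- itself is total, no precondition needed on the B side)
lemma bestB_correct (A B C : List Int) (i : Nat) :
    ∀ (w h : Int) (memo : PySem.Dict (Nat × Int × Int) Int), memoOK A B C memo →
      (bestB A B C i w h memo).1 = gDP A B C i h w
      ∧ memoOK A B C (bestB A B C i w h memo).2 := by
  induction i with
  | zero =>
    intro w h memo hm
    rw [bestB]
    cases hv : memo.get? (0, w, h) with
    | some v =>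
      exact ⟨hm 0 w h v hv, hm⟩
    | none =>
      dsimp only
      refine ⟨by rw [gDP], ?_⟩
      have := memoOK_insert A B C memo 0 w h hm
      rw [gDP] at this
      exact this
  | succ i ih =>
    intro w h memo hm
    rw [bestB]
    cases hv : memo.get? (i + 1, w, h) with
    | some v =>
      exact ⟨hm (i + 1) w h v hv, hm⟩
    | none =>
      dsimp only
      obtain ⟨hp1, hp2⟩ := ih w h memo hm
      by_cases hc : w ≥ B.getD (i + 1) 0 ∧ h ≥ C.getD (i + 1) 0
      · rw [if_pos hc]
        obtain ⟨hq1, hq2⟩ := ih (w - B.getD (i + 1) 0) (h - C.getD (i + 1) 0)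
          (bestB A B C i w h memo).2 hp2
        have hval : max (bestB A B C i w h memo).1
            ((bestB A B C i (w - B.getD (i + 1) 0) (h - C.getD (i + 1) 0)
              (bestB A B C i w h memo).2).1 + A.getD (i + 1) 0)
            = gDP A B C (i + 1) h w := by
          rw [hp1, hq1, gDP]
          dsimp only
          rw [if_pos hc]
        refine ⟨hval, ?_⟩
        rw [hval]
        exact memoOK_insert A B C _ (i + 1) w h hq2
      · rw [if_neg hc]
        have hval : (bestB A B C i w h memo).1 = gDP A B C (i + 1) h w := by
          rw [hp1, gDP]
          dsimp only
          rw [if_neg hc]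
        refine ⟨hval, ?_⟩
        rw [hval]
        exact memoOK_insert A B C _ (i + 1) w h hp2

lemma B_value (A B C : List Int) (mw mh : Int) :
    knapsack_2d_alt A B C mw mh = gDP A B C (A.length - 1) mh mw := by
  simp only [knapsack_2d_alt]
  exact (bestB_correct A B C (A.length - 1) mw mh PySem.Dict.empty (memoOK_empty A B C)).1

-- ===== VERDICT (by name: the statement is the Claim_ definition above) =====
theorem knapsack_2d_spec : Claim_equal_knapsack_2d := by
  intro A B C mw mh _ hpre
  obtain ⟨hn, hlenB, hmw, hmh, hC, hBC⟩ := hpre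
  have hBC' : ∀ k, 1 ≤ k → k < A.length →
      (B.getD k 0 ≤ mw → 0 ≤ C.getD k 0) ∧ (B.getD k 0 < 0 → mh < C.getD k 0) :=
    fun k h1 h2 => hBC k h2 h1
  unfold Spec_knapsack_2d
  rw [A_value A B C mw mh hn hmw hmh hBC', B_value A B C mw mh]
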